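-- pv_equiv track=rewrite | github.com/mrpepsi1069/TeamCore | utils/attendance.py | group_attendance_by_response
-- ===== SOURCE A (Python) =====
-- def group_attendance_by_response(attendance_list: list) -> dict:
--     grouped = {"attending": [], "maybe": [], "not_attending": []}
--     for record in attendance_list:
--         resp = record.get("response")
--         if resp == "attending":
--             grouped["attending"].append(record)
--         elif resp == "maybe":
--             grouped["maybe"].append(record)
--         elif resp == "not_attending":
--             grouped["not_attending"].append(record)
--     return grouped
-- ===== SOURCE B (Python) =====
-- def group_attendance_by_response(attendance_list: list) -> dict:
--     return {
--         "attending": [r for r in attendance_list if r.get("response") == "attending"],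
--         "maybe": [r for r in attendance_list if r.get("response") == "maybe"],
--         "not_attending": [r for r in attendance_list if r.get("response") == "not_attending"],
--     }
-- ===== Notes on version B (the rewrite author's own statement) =====
-- stated objective: alternative
-- what changed: Replaces the single stateful loop with an if/elif chain mutating a pre-built dict by a dict literal of three independent filtering comprehensions, one full scan per response bucket.
import Mathlib
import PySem

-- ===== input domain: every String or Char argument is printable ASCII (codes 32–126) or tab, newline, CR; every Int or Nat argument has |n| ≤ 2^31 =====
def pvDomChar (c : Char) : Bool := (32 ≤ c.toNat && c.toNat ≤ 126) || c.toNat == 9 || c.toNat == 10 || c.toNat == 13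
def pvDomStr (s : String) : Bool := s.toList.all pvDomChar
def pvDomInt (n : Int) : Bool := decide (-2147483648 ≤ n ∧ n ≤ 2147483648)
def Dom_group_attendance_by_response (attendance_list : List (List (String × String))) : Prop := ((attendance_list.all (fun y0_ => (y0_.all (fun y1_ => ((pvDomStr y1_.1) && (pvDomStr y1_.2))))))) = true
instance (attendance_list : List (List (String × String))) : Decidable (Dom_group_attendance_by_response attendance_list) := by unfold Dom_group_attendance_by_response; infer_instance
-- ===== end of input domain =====

-- B replaces A's single stateful loop (if/elif chain appending into a pre-built dict)
-- by a dict literal of three independent filtering passes, one per response bucket (objective: alternative).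

-- ===== PORT A =====
-- one branching pass appending into the mutable dict grouped
def group_attendance_by_response (attendance_list : List (List (String × String))) : List (String × List (List (String × String))) :=
  let grouped : PySem.Dict String (List (List (String × String))) :=
    PySem.Dict.ofList [("attending", []), ("maybe", []), ("not_attending", [])]
  let grouped := attendance_list.foldl (fun g record =>
    let resp := (PySem.Dict.mk record).get? "response"
    if resp = some "attending" then g.modify "attending" [] (· ++ [record])
    else if resp = some "maybe" then g.modify "maybe" [] (· ++ [record])
    else if resp = some "not_attending" then g.modify "not_attending" [] (· ++ [record])
    else g) grouped
  grouped.items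

-- ===== PORT B =====
-- three independent filtering scans, assembled into the literal result
def group_attendance_by_response_alt (attendance_list : List (List (String × String))) : List (String × List (List (String × String))) :=
  [("attending", attendance_list.filter (fun r => (PySem.Dict.mk r).get? "response" == some "attending")),
   ("maybe", attendance_list.filter (fun r => (PySem.Dict.mk r).get? "response" == some "maybe")),
   ("not_attending", attendance_list.filter (fun r => (PySem.Dict.mk r).get? "response" == some "not_attending"))]

-- ===== PRECONDITION & SPEC =====
def Spec_group_attendance_by_response (attendance_list : List (List (String × String))) (out : List (String × List (List (String × String)))) : Prop := out = group_attendance_by_response_alt attendance_list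
instance (attendance_list : List (List (String × String))) (out : List (String × List (List (String × String)))) : Decidable (Spec_group_attendance_by_response attendance_list out) := by unfold Spec_group_attendance_by_response; infer_instance

-- ===== CLAIM (what is proved, stated in full; the proofs are below) =====
def Claim_equal_group_attendance_by_response : Prop := ∀ (attendance_list : List (List (String × String))), Dom_group_attendance_by_response attendance_list → Spec_group_attendance_by_response attendance_list (group_attendance_by_response attendance_list)

-- ===== LEMMAS AND PROOFS =====

-- A's loop body, named for the proofs (definitionally the lambda in the port)
def gabrStep (g : PySem.Dict String (List (List (String × String)))) (record : List (String × String)) :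
    PySem.Dict String (List (List (String × String))) :=
  let resp := (PySem.Dict.mk record).get? "response"
  if resp = some "attending" then g.modify "attending" [] (· ++ [record])
  else if resp = some "maybe" then g.modify "maybe" [] (· ++ [record])
  else if resp = some "not_attending" then g.modify "not_attending" [] (· ++ [record])
  else g

theorem gabrStep_att (r : List (String × String)) (as ms ns : List (List (String × String)))
    (h : (PySem.Dict.mk r).get? "response" = some "attending") :
    gabrStep (PySem.Dict.mk [("attending", as), ("maybe", ms), ("not_attending", ns)]) r
      = PySem.Dict.mk [("attending", as ++ [r]), ("maybe", ms), ("not_attending", ns)] := by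
  unfold gabrStep
  rw [if_pos h]
  simp [PySem.Dict.modify, PySem.Dict.contains, PySem.Dict.getD, PySem.Dict.insert, PySem.Dict.get?]

theorem gabrStep_may (r : List (String × String)) (as ms ns : List (List (String × String)))
    (h1 : ¬ (PySem.Dict.mk r).get? "response" = some "attending")
    (h : (PySem.Dict.mk r).get? "response" = some "maybe") :
    gabrStep (PySem.Dict.mk [("attending", as), ("maybe", ms), ("not_attending", ns)]) r
      = PySem.Dict.mk [("attending", as), ("maybe", ms ++ [r]), ("not_attending", ns)] := by
  unfold gabrStep
  rw [if_neg h1, if_pos h]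
  simp [PySem.Dict.modify, PySem.Dict.contains, PySem.Dict.getD, PySem.Dict.insert, PySem.Dict.get?]

theorem gabrStep_not (r : List (String × String)) (as ms ns : List (List (String × String)))
    (h1 : ¬ (PySem.Dict.mk r).get? "response" = some "attending")
    (h2 : ¬ (PySem.Dict.mk r).get? "response" = some "maybe")
    (h : (PySem.Dict.mk r).get? "response" = some "not_attending") :
    gabrStep (PySem.Dict.mk [("attending", as), ("maybe", ms), ("not_attending", ns)]) r
      = PySem.Dict.mk [("attending", as), ("maybe", ms), ("not_attending", ns ++ [r])] := by
  unfold gabrStep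
  rw [if_neg h1, if_neg h2, if_pos h]
  simp [PySem.Dict.modify, PySem.Dict.contains, PySem.Dict.getD, PySem.Dict.insert, PySem.Dict.get?]

theorem gabrStep_none (r : List (String × String)) (g : PySem.Dict String (List (List (String × String))))
    (h1 : ¬ (PySem.Dict.mk r).get? "response" = some "attending")
    (h2 : ¬ (PySem.Dict.mk r).get? "response" = some "maybe")
    (h3 : ¬ (PySem.Dict.mk r).get? "response" = some "not_attending") :
    gabrStep g r = g := by
  unfold gabrStep
  rw [if_neg h1, if_neg h2, if_neg h3]

-- loop invariant: A's fold appends exactly the matching records to each bucket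
theorem gabr_loop (xs : List (List (String × String)))
    (as ms ns : List (List (String × String))) :
    xs.foldl gabrStep (PySem.Dict.mk [("attending", as), ("maybe", ms), ("not_attending", ns)])
    = PySem.Dict.mk
        [("attending", as ++ xs.filter (fun r => (PySem.Dict.mk r).get? "response" == some "attending")),
         ("maybe", ms ++ xs.filter (fun r => (PySem.Dict.mk r).get? "response" == some "maybe")),
         ("not_attending", ns ++ xs.filter (fun r => (PySem.Dict.mk r).get? "response" == some "not_attending"))] := by
  induction xs generalizing as ms ns with
  | nil => simp
  | cons r rest ih =>
    rw [List.foldl_cons]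
    by_cases h1 : (PySem.Dict.mk r).get? "response" = some "attending"
    · rw [gabrStep_att r as ms ns h1, ih]
      simp [h1]
    · by_cases h2 : (PySem.Dict.mk r).get? "response" = some "maybe"
      · rw [gabrStep_may r as ms ns h1 h2, ih]
        simp [h2]
      · by_cases h3 : (PySem.Dict.mk r).get? "response" = some "not_attending"
        · rw [gabrStep_not r as ms ns h1 h2 h3, ih]
          simp [h3]
        · rw [gabrStep_none r _ h1 h2 h3, ih]
          simp [h1, h2, h3]

-- ===== VERDICT (by name: the statement is the Claim_ definition above) =====
theorem group_attendance_by_response_spec : Claim_equal_group_attendance_by_response := by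
  intro xs _
  show group_attendance_by_response xs = group_attendance_by_response_alt xs
  show (List.foldl gabrStep
      (PySem.Dict.mk [("attending", []), ("maybe", []), ("not_attending", [])]) xs).items
    = group_attendance_by_response_alt xs
  rw [gabr_loop]
  simp [group_attendance_by_response_alt]
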